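-- pv_equiv track=rewrite | github.com/PhoneticsBug/Code-Workouts | workouts/Algorithm/august/week4/12927. 야근 지수/12927.py | solution
-- ===== SOURCE A (Python) =====
-- def solution(n, works):
--     answer = 0
--     while n > 0:
--         for i in range(len(works)):
--             if n <= 0:
--                 break
--             n -= 1
--             works[i] -= 1
--
--     for j in works:
--         if j <= 0:
--             temp = works.index(j)
--             works = works[:temp] + works[temp+1:]
--
--     answer = sum(i**2 for i in works)
--
--     return answer
-- ===== SOURCE B (Python) =====
-- def solution(n, works):
--     # Note: unlike the original, this does not mutate the caller's list;
--     # the equivalence claimed is about the return value only.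
--     if n > 0 and works:
--         q, r = divmod(n, len(works))
--         works = [w - q - (1 if i < r else 0) for i, w in enumerate(works)]
--     return sum(w * w for w in works if w > 0)
-- ===== Notes on version B (the rewrite author's own statement) =====
-- stated objective: faster
-- what changed: The round-robin while-loop (n single decrements) is replaced by a closed-form per-index decrement q=n//len plus 1 for the first n%len indices, and the quadratic index-and-slice removal loop is replaced by a single filter for positive values; the sum of squares is taken directly.
import Mathlib
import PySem

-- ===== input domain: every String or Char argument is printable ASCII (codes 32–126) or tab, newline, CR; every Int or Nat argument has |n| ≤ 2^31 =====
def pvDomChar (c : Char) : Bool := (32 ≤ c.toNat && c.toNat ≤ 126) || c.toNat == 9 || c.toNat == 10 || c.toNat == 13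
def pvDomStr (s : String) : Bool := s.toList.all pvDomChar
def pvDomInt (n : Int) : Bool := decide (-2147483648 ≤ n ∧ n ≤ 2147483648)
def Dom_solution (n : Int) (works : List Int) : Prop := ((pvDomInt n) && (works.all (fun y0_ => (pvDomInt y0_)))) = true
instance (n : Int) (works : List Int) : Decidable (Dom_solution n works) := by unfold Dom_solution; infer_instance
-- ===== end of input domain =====

-- B replaces the O(n) round-robin decrement loop and the O(len^2) index-and-slice removal
-- loop by a closed-form per-index decrement (divmod) and a filter of the positive values.
-- A mutates the `works` list in place; B does not — the claim is about the return value.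

-- ===== PORT A =====
-- inner `for i in range(len(works)): if n <= 0: break; n -= 1; works[i] -= 1`:
-- the indices are visited left to right, so the in-place updates become the
-- obvious structural recursion rebuilding the same list.
def solutionInner (n : Int) (works : List Int) : Int × List Int :=
  match works with
  | [] => (n, [])
  | w :: ws =>
    if n ≤ 0 then (n, w :: ws)
    else
      let r := solutionInner (n - 1) ws
      (r.1, (w - 1) :: r.2)

-- `while n > 0`: each full pass lowers n by min(n, len works) ≥ 1 when works ≠ [],
-- so fuel n.toNat suffices; on works = [] with n > 0 the Python diverges (excluded by Pre_).
def solutionWhile (fuel : Nat) (n : Int) (works : List Int) : List Int :=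
  match fuel with
  | 0 => works
  | fuel + 1 =>
    if n > 0 then
      let p := solutionInner n works
      solutionWhile fuel p.1 p.2
    else works

-- `for j in works: if j <= 0: temp = works.index(j); works = works[:temp] + works[temp+1:]`
-- iterates over the snapshot taken when the loop starts while `works` is rebound.
def solutionRemove (snapshot : List Int) (works : List Int) : List Int :=
  match snapshot with
  | [] => works
  | j :: rest =>
    if j ≤ 0 then
      match PySem.List.index? works j with
      | some temp =>
          solutionRemove rest
            (PySem.List.slice works none (some (temp : Int)) ++
             PySem.List.slice works (some ((temp : Int) + 1)) none)
      | none => solutionRemove rest works  -- unreachable: j is always present in works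
    else solutionRemove rest works

def solution (n : Int) (works : List Int) : Int :=
  let w1 := solutionWhile n.toNat n works
  let w2 := solutionRemove w1 w1
  (w2.map (fun i => i ^ 2)).sum

-- ===== PORT B =====
def solution_alt (n : Int) (works : List Int) : Int :=
  let works' :=
    if n > 0 ∧ works ≠ [] then
      let q := PySem.Int.floordiv n works.length
      let r := PySem.Int.mod n works.length
      (PySem.List.enumerate works).map (fun p => p.2 - q - (if p.1 < r then 1 else 0))
    else works
  ((works'.filter (fun w => decide (0 < w))).map (fun w => w * w)).sum

-- ===== PRECONDITION & SPEC =====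
-- Pre_ excludes only works = [] with n > 0, where A's while-loop never terminates.
def Pre_solution (n : Int) (works : List Int) : Prop := works ≠ [] ∨ n ≤ 0
instance (n : Int) (works : List Int) : Decidable (Pre_solution n works) := by
  unfold Pre_solution; infer_instance

def pvWitness_solution : Int × List Int := (7, [4, 3, 3])

def Spec_solution (n : Int) (works : List Int) (out : Int) : Prop := out = solution_alt n works
instance (n : Int) (works : List Int) (out : Int) : Decidable (Spec_solution n works out) := by
  unfold Spec_solution; infer_instance

-- ===== CLAIM (what is proved, stated in full; the proofs are below) =====
def Claim_equal_solution : Prop := ∀ (n : Int) (works : List Int), Dom_solution n works → Pre_solution n works → Spec_solution n works (solution n works)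

-- ===== LEMMAS AND PROOFS =====

-- what one inner pass does to the list: first n elements lose 1
def decPass (n : Int) : List Int → List Int
  | [] => []
  | w :: ws => if 0 < n then (w - 1) :: decPass (n - 1) ws else w :: ws

theorem solutionInner_eq (n : Int) (hn : 0 ≤ n) (ws : List Int) :
    solutionInner n ws = (max (n - ws.length) 0, decPass n ws) := by
  induction ws generalizing n with
  | nil =>
    simp only [solutionInner, decPass, List.length_nil, Nat.cast_zero, sub_zero]
    rw [max_eq_left hn]
  | cons w ws ih =>
    by_cases h : n ≤ 0
    · have : n = 0 := le_antisymm h hn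
      subst this
      simp [solutionInner, decPass]
    · have h1 : 0 ≤ n - 1 := by omega
      simp only [solutionInner, if_neg h, ih (n-1) h1, decPass, if_pos (by omega : (0:Int) < n)]
      simp only [List.length_cons, Prod.mk.injEq]
      exact ⟨by push_cast; omega, trivial⟩

theorem decPass_length (n : Int) (ws : List Int) : (decPass n ws).length = ws.length := by
  induction ws generalizing n with
  | nil => rfl
  | cons w ws ih => by_cases h : 0 < n <;> simp [decPass, h, ih]

theorem decPass_getElem (n : Int) (ws : List Int) (i : Nat) (h : i < ws.length) :
    (decPass n ws)[i]'(by rw [decPass_length]; exact h) =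
      if (i : Int) < n then ws[i] - 1 else ws[i] := by
  induction ws generalizing n i with
  | nil => simp at h
  | cons w ws ih =>
    by_cases hn : 0 < n
    · cases i with
      | zero => simp [decPass, hn]
      | succ i =>
        have hi : i < ws.length := by simpa using h
        simp only [decPass, if_pos hn, List.getElem_cons_succ, ih (n-1) i hi]
        have hiff : ((i : Int) < n - 1) ↔ (((i+1 : Nat) : Int) < n) := by push_cast; omega
        by_cases hc : (i : Int) < n - 1
        · rw [if_pos hc, if_pos (hiff.mp hc)]
        · rw [if_neg hc, if_neg (fun hh => hc (hiff.mpr hh))]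
    · cases i with
      | zero =>
        simp only [decPass, if_neg hn, List.getElem_cons_zero]
        rw [if_neg (by omega)]
      | succ i =>
        simp only [decPass, if_neg hn, List.getElem_cons_succ]
        rw [if_neg (by push_cast; omega)]

-- closed form of the whole while-loop
def decAll (n : Int) (ws : List Int) : List Int :=
  ws.mapIdx (fun i w => w - ((n / ws.length) + if (i : Int) < n % ws.length then 1 else 0))

theorem decAll_length (n : Int) (ws : List Int) : (decAll n ws).length = ws.length := by
  simp [decAll]

theorem mapIdx_id' (l : List Int) : l.mapIdx (fun _ w => w) = l := by
  induction l with
  | nil => rfl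
  | cons a l ih => simp [List.mapIdx_cons]; exact ih

theorem decAll_zero (ws : List Int) : decAll 0 ws = ws := by
  unfold decAll
  have : (fun (i : Nat) (w : Int) => w - ((0 / (ws.length : Int)) + if (i : Int) < 0 % ws.length then 1 else 0)) = fun _ w => w := by
    funext i w
    simp only [Int.zero_ediv, Int.zero_emod]
    rw [if_neg (show ¬((i : Int) < (0 : Int)) by omega)]
    ring
  rw [this, mapIdx_id']

theorem decAll_step (n : Int) (hn : 0 < n) (ws : List Int) (hws : ws ≠ []) :
    decAll (max (n - ws.length) 0) (decPass n ws) = decAll n ws := by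
  have hlen : 0 < ws.length := List.length_pos_iff.mpr hws
  have hL : (0 : Int) < (ws.length : Int) := by exact_mod_cast hlen
  apply List.ext_getElem
  · simp [decAll_length, decPass_length]
  · intro i h1 h2
    have hi : i < ws.length := by
      have := h2; rwa [decAll_length] at this
    simp only [decAll, List.getElem_mapIdx, decPass_length, decPass_getElem n ws i hi]
    have hiL : (i : Int) < (ws.length : Int) := by exact_mod_cast hi
    have hi0 : (0 : Int) ≤ (i : Int) := Int.natCast_nonneg i
    by_cases hbig : (ws.length : Int) ≤ n
    · have hmax : max (n - (ws.length : Int)) 0 = n - (ws.length : Int) := by omega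
      have hind : (i : Int) < n := lt_of_lt_of_le hiL hbig
      have hdiv : (n - (ws.length : Int)) / (ws.length : Int) = n / (ws.length : Int) - 1 := by
        have h0 := Int.add_mul_ediv_right n (-1) (by omega : (ws.length : Int) ≠ 0)
        have h' : n + (-1) * (ws.length : Int) = n - (ws.length : Int) := by ring
        rw [h'] at h0
        omega
      have hmod : (n - (ws.length : Int)) % (ws.length : Int) = n % (ws.length : Int) :=
        Int.sub_emod_right n (ws.length : Int)
      simp only [hmax, hdiv, hmod]
      rw [if_pos hind]
      ring
    · have hmax : max (n - (ws.length : Int)) 0 = 0 := by omega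
      have hdiv : n / (ws.length : Int) = 0 := Int.ediv_eq_zero_of_lt (by omega) (by omega)
      have hmod : n % (ws.length : Int) = n := Int.emod_eq_of_lt (by omega) (by omega)
      simp only [hmax, hdiv, hmod, Int.zero_ediv, Int.zero_emod]
      rw [if_neg (show ¬((i : Int) < (0 : Int)) by omega)]
      split_ifs <;> ring

theorem decPass_ne_nil (n : Int) (ws : List Int) (h : ws ≠ []) : decPass n ws ≠ [] := by
  intro hc
  have := decPass_length n ws
  rw [hc] at this
  simp at this
  exact h (List.length_eq_zero_iff.mp this.symm)

theorem solutionWhile_eq (fuel : Nat) (n : Int) (ws : List Int) (hws : ws ≠ [])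
    (h0 : 0 ≤ n) (hf : n ≤ fuel) : solutionWhile fuel n ws = decAll n ws := by
  induction fuel generalizing n ws with
  | zero =>
    have : n = 0 := by omega
    subst this
    simp [solutionWhile, decAll_zero]
  | succ fuel ih =>
    by_cases hn : 0 < n
    · have hlen : 0 < ws.length := List.length_pos_iff.mpr hws
      simp only [solutionWhile, if_pos hn, solutionInner_eq n h0 ws]
      rw [ih (max (n - ws.length) 0) (decPass n ws) (decPass_ne_nil n ws hws)
        (by omega) (by omega)]
      exact decAll_step n hn ws hws
    · have : n = 0 := by omega
      subst this
      simp [solutionWhile, decAll_zero]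

theorem solutionRemove_invariant (L : List Int) (pref : List Int)
    (hp : ∀ x ∈ pref, 0 < x) :
    solutionRemove L (pref ++ L) = pref ++ L.filter (fun w => decide (0 < w)) := by
  induction L generalizing pref with
  | nil => simp [solutionRemove]
  | cons j rest ih =>
    by_cases hj : j ≤ 0
    · have hnotin : j ∉ pref := fun hm => absurd (hp j hm) (by omega)
      have hidx : PySem.List.index? (pref ++ j :: rest) j = some pref.length := by
        rw [PySem.List.index?_eq_some_iff]
        exact ⟨pref, rest, rfl, rfl, hnotin⟩
      simp only [solutionRemove, if_pos hj, hidx]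
      have hcast : ((pref.length : Int) + 1) = (((pref.length + 1 : Nat)) : Int) := by push_cast; ring
      rw [PySem.List.slice_to_natCast, hcast, PySem.List.slice_from_natCast]
      have htake : (pref ++ j :: rest).take pref.length = pref := by simp
      have hdrop : (pref ++ j :: rest).drop (pref.length + 1) = rest := by
        have : pref ++ j :: rest = (pref ++ [j]) ++ rest := by simp
        rw [this]
        have hl : (pref ++ [j]).length = pref.length + 1 := by simp
        rw [← hl]
        simp
      rw [htake, hdrop, ih pref hp]
      have hfil : List.filter (fun w => decide (0 < w)) (j :: rest) = List.filter (fun w => decide (0 < w)) rest := by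
        simp [show ¬ (0 < j) by omega]
      rw [hfil]
    · have hpos : 0 < j := by omega
      simp only [solutionRemove, if_neg hj]
      have harr : pref ++ j :: rest = (pref ++ [j]) ++ rest := by simp
      rw [harr, ih (pref ++ [j]) (by
        intro x hx
        rcases List.mem_append.mp hx with h | h
        · exact hp x h
        · simp at h; omega)]
      simp [hpos]

theorem sum_sq_map (l : List Int) :
    (l.map (fun i => i ^ 2)).sum = (l.map (fun w => w * w)).sum := by
  congr 1
  apply List.map_congr_left
  intro x _
  ring

-- B's comprehension equals the closed form decAll (for 0 < n, ws ≠ [])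
theorem alt_list_eq (n : Int) (_hn : 0 < n) (ws : List Int) (hws : ws ≠ []) :
    (PySem.List.enumerate ws).map
      (fun p => p.2 - PySem.Int.floordiv n ws.length - (if p.1 < PySem.Int.mod n ws.length then 1 else 0))
      = decAll n ws := by
  have hlen : 0 < ws.length := List.length_pos_iff.mpr hws
  have hL : (0 : Int) < (ws.length : Int) := by exact_mod_cast hlen
  rw [PySem.Int.floordiv_eq_ediv_of_pos hL, PySem.Int.mod_eq_emod_of_pos hL]
  apply List.ext_getElem
  · simp [decAll, PySem.List.length_enumerate]
  · intro i h1 h2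
    have hi : i < ws.length := by
      have := h1
      simpa [PySem.List.length_enumerate] using this
    simp only [List.getElem_map, PySem.List.getElem_enumerate, decAll, List.getElem_mapIdx]
    simp only [zero_add]
    split_ifs <;> ring

-- ===== VERDICT (by name: the statement is the Claim_ definition above) =====
theorem solution_spec : Claim_equal_solution := by
  intro n works _hdom hpre
  unfold Spec_solution solution solution_alt
  dsimp only
  have hrm : ∀ (l : List Int), solutionRemove l l = l.filter (fun w => decide (0 < w)) := by
    intro l
    simpa using solutionRemove_invariant l [] (by intro x hx; simp at hx)
  by_cases hn : 0 < n
  · have hws : works ≠ [] := by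
      rcases hpre with h | h
      · exact h
      · omega
    rw [solutionWhile_eq n.toNat n works hws (le_of_lt hn) (by omega), hrm,
      if_pos ⟨hn, hws⟩, alt_list_eq n hn works hws]
    exact sum_sq_map _
  · have htn : n.toNat = 0 := by omega
    rw [htn]
    simp only [solutionWhile]
    rw [hrm, if_neg (by intro ⟨h, _⟩; omega : ¬ (n > 0 ∧ works ≠ []))]
    exact sum_sq_map _
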